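-- pv_equiv track=rewrite | github.com/nikhil-codes-hub/ad_revamped | frontend/streamlit_ui/app_core.py | compute_effective_paths
-- ===== SOURCE A (Python) =====
-- from typing import Optional, Dict, Any, List
--
-- def _path_ancestors(path: str) -> List[str]:
--     parts = path.split('/')
--     return ['/'.join(parts[:i]) for i in range(1, len(parts)) if parts[:i]]
--
-- def filter_raw_paths(raw_paths: List[str], previous_raw: Optional[List[str]] = None,
--                      previous_effective: Optional[List[str]] = None) -> List[str]:
--     """Remove auto-selected descendants when parent is newly chosen,
--     and remove auto-selected parents when all children are manually selected."""
--     unique_paths = list(dict.fromkeys(raw_paths or []))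
--     prev_selected = set(previous_raw or []) | set(previous_effective or [])
--     raw_set = set(unique_paths)
--
--     filtered = []
--     for path in unique_paths:
--         # Check if parent is selected
--         has_parent_selected = any(parent in raw_set for parent in _path_ancestors(path))
--         if has_parent_selected and path not in prev_selected:
--             continue  # Skip descendants implicitly checked via parent
--
--         # NEW: Check if this parent was auto-selected by the tree component
--         # When user selects all children, tree component auto-checks the parent
--         # We detect this by checking if:
--         # 1. This path has children (descendants) in the selection
--         # 2. This path was NOT in the previous selection (it's newly appeared)
--         # 3. At least one child was in the previous selection (user was selecting children)
--         if path not in prev_selected: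
--             has_children_selected = any(p.startswith(f"{path}/") for p in raw_set)
--             if has_children_selected:
--                 # Check if any child was previously selected (indicating user is selecting children, not parent)
--                 any_child_was_selected = any(p.startswith(f"{path}/") for p in prev_selected)
--                 if any_child_was_selected:
--                     # This parent was auto-checked by tree component, skip it
--                     continue
--
--         filtered.append(path)
--
--     return filtered
--
-- def compute_effective_paths(raw_paths: List[str],
--                             previous_effective: Optional[List[str]] = None,
--                             previous_raw: Optional[List[str]] = None) -> List[str]:
--     """Compute effective enabled paths based on filtered raw selections and prior state."""
--
--     filtered_raw = filter_raw_paths(raw_paths, previous_raw, previous_effective)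
--     prev_paths = previous_effective or []
--
--     raw_set = set(filtered_raw)
--     prev_set = set(prev_paths)
--     final_set = set(prev_paths)
--
--     # Remove entries explicitly unchecked (no descendants selected)
--     removed_paths = prev_set - raw_set
--     for path in removed_paths:
--         has_descendant = any(desc == path or desc.startswith(f"{path}/") for desc in raw_set)
--         if not has_descendant:
--             final_set.discard(path)
--
--     # Add newly checked nodes
--     final_set.update(raw_set)
--
--     # When child selected without parent previously, ensure parent stays disabled
--     for path in list(final_set):
--         for parent in _path_ancestors(path):
--             if parent in final_set and parent not in prev_set and parent not in raw_set:
--                 final_set.discard(parent)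
--
--     ordered: List[str] = []
--
--     for path in prev_paths:
--         if path in final_set and path not in ordered:
--             ordered.append(path)
--
--     for path in filtered_raw:
--         if path in final_set and path not in ordered:
--             ordered.append(path)
--
--     # Add any remaining (e.g., parents restored due to descendants) by depth
--     for path in sorted(final_set, key=lambda p: (p.count('/'), p)):
--         if path not in ordered:
--             ordered.append(path)
--
--     return ordered
-- ===== SOURCE B (Python) =====
-- from typing import Optional, List
--
--
-- def _ancestors(path: str) -> List[str]:
--     """All proper '/'-delimited prefixes of path, shallowest first (one char pass)."""
--     out = []
--     cur = []
--     for ch in path: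
--         if ch == '/':
--             out.append(''.join(cur))
--         cur.append(ch)
--     return out
--
--
-- def compute_effective_paths(raw_paths: List[str],
--                             previous_effective: Optional[List[str]] = None,
--                             previous_raw: Optional[List[str]] = None) -> List[str]:
--     prev_paths = previous_effective or []
--     prev_selected = set(previous_raw or []) | set(prev_paths)
--     unique = list(dict.fromkeys(raw_paths or []))
--     raw_set = set(unique)
--
--     # ancestor sets computed once: O(1) membership replaces the startswith scans
--     anc_of_raw = {a for p in unique for a in _ancestors(p)}
--     anc_of_prev = {a for p in prev_selected for a in _ancestors(p)}
--
--     filtered = []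
--     for p in unique:
--         if p not in prev_selected:
--             if any(a in raw_set for a in _ancestors(p)):
--                 continue  # parent explicitly selected: drop auto-selected descendant
--             if p in anc_of_raw and p in anc_of_prev:
--                 continue  # parent auto-checked because its children were selected
--         filtered.append(p)
--
--     filtered_set = set(filtered)
--     anc_of_filtered = {a for p in filtered for a in _ancestors(p)}
--
--     # previous effective paths survive iff re-selected or still an ancestor of a selection;
--     # then append the newly selected paths, deduplicating in order
--     ordered = []
--     seen = set()
--     for p in prev_paths:
--         if p not in seen and (p in filtered_set or p in anc_of_filtered):
--             seen.add(p)
--             ordered.append(p)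
--     for p in filtered:
--         if p not in seen:
--             seen.add(p)
--             ordered.append(p)
--     return ordered
-- ===== Notes on version B (the rewrite author's own statement) =====
-- stated objective: faster
-- what changed: B precomputes the sets of '/'-ancestors of the selected/previous paths once (one char-scan per path) so every per-path startswith scan over the whole selection becomes an O(1) set lookup, and replaces A's discard/update/re-sort set choreography (whose parent-discard loop and final depth-sort pass are provably dead) by a single ordered two-phase emission with a seen-set.
import Mathlib
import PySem

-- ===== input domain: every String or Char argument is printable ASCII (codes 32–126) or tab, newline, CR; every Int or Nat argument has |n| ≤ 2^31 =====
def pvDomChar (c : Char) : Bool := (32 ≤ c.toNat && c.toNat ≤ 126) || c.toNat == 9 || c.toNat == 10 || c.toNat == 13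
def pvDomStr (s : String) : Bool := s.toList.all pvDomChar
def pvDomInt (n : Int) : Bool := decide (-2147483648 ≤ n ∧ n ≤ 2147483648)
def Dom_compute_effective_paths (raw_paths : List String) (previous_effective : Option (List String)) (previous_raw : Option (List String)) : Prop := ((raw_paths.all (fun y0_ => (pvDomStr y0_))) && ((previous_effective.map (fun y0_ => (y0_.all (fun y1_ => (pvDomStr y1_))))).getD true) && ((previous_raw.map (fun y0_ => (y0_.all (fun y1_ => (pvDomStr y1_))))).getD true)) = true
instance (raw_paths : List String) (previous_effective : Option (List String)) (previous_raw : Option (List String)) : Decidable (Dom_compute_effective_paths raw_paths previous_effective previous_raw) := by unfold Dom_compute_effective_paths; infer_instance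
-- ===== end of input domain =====

-- B replaces A's quadratic startswith scans by precomputed ancestor sets and a single
-- ordered emission pass (objective: faster).

-- ===== PORT A =====
-- A's helper _path_ancestors (split / join based)
def pathAncestors (path : String) : List String :=
  let parts := (PySem.Str.split? path "/").getD []
  (PySem.List.pyRange 1 (parts.length : Int) 1).foldl
    (fun acc i =>
      if PySem.List.slice parts none (some i) = [] then acc
      else acc ++ [PySem.Str.join "/" (PySem.List.slice parts none (some i))]) []

-- A's helper filter_raw_paths
def filter_raw_paths (raw_paths : List String) (previous_raw : Option (List String))
    (previous_effective : Option (List String)) : List String :=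
  let unique_paths := PySem.List.dedup raw_paths
  let prev_selected : PySem.Set String :=
    PySem.Set.union (PySem.Set.ofList (previous_raw.getD []))
      (PySem.Set.ofList (previous_effective.getD []))
  let raw_set : PySem.Set String := PySem.Set.ofList unique_paths
  unique_paths.foldl
    (fun filtered path =>
      if ((pathAncestors path).any (fun parent => raw_set.contains parent))
          && !(prev_selected.contains path) then filtered
      else if !(prev_selected.contains path)
          && raw_set.any (fun p => PySem.Str.startswith p (path ++ "/"))
          && prev_selected.any (fun p => PySem.Str.startswith p (path ++ "/")) then filtered
      else filtered ++ [path]) []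

def compute_effective_paths (raw_paths : List String) (previous_effective : Option (List String))
    (previous_raw : Option (List String)) : List String :=
  let filtered_raw := filter_raw_paths raw_paths previous_raw previous_effective
  let prev_paths := previous_effective.getD []
  let raw_set : PySem.Set String := PySem.Set.ofList filtered_raw
  let prev_set : PySem.Set String := PySem.Set.ofList prev_paths
  let final0 : PySem.Set String := PySem.Set.ofList prev_paths
  let removed_paths := prev_set.diff raw_set
  let final1 := removed_paths.foldl
    (fun fs path =>
      if !(raw_set.any (fun desc => desc == path || PySem.Str.startswith desc (path ++ "/")))
      then fs.discard path else fs) final0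
  let final2 := final1.update raw_set
  let final3 := final2.foldl
    (fun fs path =>
      (pathAncestors path).foldl
        (fun fs parent =>
          if fs.contains parent && !(prev_set.contains parent) && !(raw_set.contains parent)
          then fs.discard parent else fs) fs) final2
  let ordered1 := prev_paths.foldl
    (fun ordered path =>
      if final3.contains path && !(ordered.contains path) then ordered ++ [path] else ordered) []
  let ordered2 := filtered_raw.foldl
    (fun ordered path =>
      if final3.contains path && !(ordered.contains path) then ordered ++ [path] else ordered)
    ordered1
  (PySem.List.sorted2 final3 (fun p => PySem.Str.count p "/") (fun p => p) false).foldl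
    (fun ordered path => if !(ordered.contains path) then ordered ++ [path] else ordered) ordered2

-- ===== PORT B =====
-- B's helper _ancestors (one pass over the characters; cur kept as List Char, ''.join = String.ofList)
def ancestorsAlt (path : String) : List String :=
  (path.toList.foldl
    (fun (st : List String × List Char) ch =>
      (if ch == '/' then st.1 ++ [String.ofList st.2] else st.1, st.2 ++ [ch]))
    ([], [])).1

def compute_effective_paths_alt (raw_paths : List String) (previous_effective : Option (List String))
    (previous_raw : Option (List String)) : List String :=
  let prev_paths := previous_effective.getD []
  let prev_selected : PySem.Set String :=
    PySem.Set.union (PySem.Set.ofList (previous_raw.getD [])) (PySem.Set.ofList prev_paths)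
  let unique := PySem.List.dedup raw_paths
  let raw_set : PySem.Set String := PySem.Set.ofList unique
  let anc_of_raw : PySem.Set String := PySem.Set.ofList (unique.flatMap ancestorsAlt)
  let anc_of_prev : PySem.Set String := PySem.Set.ofList (prev_selected.flatMap ancestorsAlt)
  let filtered := unique.foldl
    (fun filtered p =>
      if !(prev_selected.contains p) then
        if (ancestorsAlt p).any (fun a => raw_set.contains a) then filtered
        else if anc_of_raw.contains p && anc_of_prev.contains p then filtered
        else filtered ++ [p]
      else filtered ++ [p]) []
  let filtered_set : PySem.Set String := PySem.Set.ofList filtered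
  let anc_of_filtered : PySem.Set String := PySem.Set.ofList (filtered.flatMap ancestorsAlt)
  let st1 := prev_paths.foldl
    (fun (st : List String × PySem.Set String) p =>
      if !(st.2.contains p) && (filtered_set.contains p || anc_of_filtered.contains p)
      then (st.1 ++ [p], st.2.add p) else st)
    ([], PySem.Set.empty)
  let st2 := filtered.foldl
    (fun (st : List String × PySem.Set String) p =>
      if !(st.2.contains p) then (st.1 ++ [p], st.2.add p) else st) st1
  st2.1

-- ===== PRECONDITION & SPEC =====
def Spec_compute_effective_paths (raw_paths : List String) (previous_effective : Option (List String)) (previous_raw : Option (List String)) (out : List String) : Prop := out = compute_effective_paths_alt raw_paths previous_effective previous_raw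
instance (raw_paths : List String) (previous_effective : Option (List String)) (previous_raw : Option (List String)) (out : List String) : Decidable (Spec_compute_effective_paths raw_paths previous_effective previous_raw out) := by unfold Spec_compute_effective_paths; infer_instance

-- ===== CLAIM (what is proved, stated in full; the proofs are below) =====
def Claim_equal_compute_effective_paths : Prop := ∀ (raw_paths : List String) (previous_effective : Option (List String)) (previous_raw : Option (List String)), Dom_compute_effective_paths raw_paths previous_effective previous_raw → Spec_compute_effective_paths raw_paths previous_effective previous_raw (compute_effective_paths raw_paths previous_effective previous_raw)

-- ===== LEMMAS AND PROOFS =====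

-- ---------- B-side: characterization of ancestorsAlt ----------

def goS (pre : List Char) : List Char → List String
  | [] => []
  | c :: t => (if c == '/' then [String.ofList pre] else []) ++ goS (pre ++ [c]) t

theorem altFold (cs : List Char) : ∀ (out : List String) (cur : List Char),
    cs.foldl (fun (st : List String × List Char) ch =>
      (if ch == '/' then st.1 ++ [String.ofList st.2] else st.1, st.2 ++ [ch])) (out, cur)
    = (out ++ goS cur cs, cur ++ cs) := by
  induction cs with
  | nil => intro out cur; simp [goS]
  | cons c t ih =>
    intro out cur
    simp only [List.foldl_cons]
    by_cases h : c = '/'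
    · subst h; rw [ih]; simp [goS]
    · rw [if_neg (by simpa using h), ih]; simp [goS, h]

theorem ancestorsAlt_eq (p : String) : ancestorsAlt p = goS [] p.toList := by
  unfold ancestorsAlt
  rw [altFold]
  simp

theorem mem_goS (cs : List Char) : ∀ (pre : List Char) (q : String),
    q ∈ goS pre cs ↔ ∃ u v, cs = u ++ '/' :: v ∧ q = String.ofList (pre ++ u) := by
  induction cs with
  | nil =>
    intro pre q
    show q ∈ ([] : List String) ↔ _
    constructor
    · intro h; cases h
    · rintro ⟨u, v, h, -⟩; exact absurd h (by simp)
  | cons c t ih =>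
    intro pre q
    show q ∈ (if c == '/' then [String.ofList pre] else []) ++ goS (pre ++ [c]) t ↔ _
    rw [List.mem_append]
    constructor
    · rintro (hq | hq)
      · by_cases h : c = '/'
        · subst h
          rw [if_pos (by decide : (('/' : Char) == '/') = true)] at hq
          exact ⟨[], t, by simp, by simpa using hq⟩
        · simp [h] at hq
      · rcases (ih (pre ++ [c]) q).mp hq with ⟨u, v, ht, hqe⟩
        exact ⟨c :: u, v, by simp [ht], by simpa [List.append_assoc] using hqe⟩
    · rintro ⟨u, v, hcs, hq⟩
      cases u with
      | nil =>
        simp only [List.nil_append, List.cons.injEq] at hcs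
        left
        simp [hcs.1, hq]
      | cons c' u' =>
        simp only [List.cons_append, List.cons.injEq] at hcs
        right
        exact (ih (pre ++ [c]) q).mpr ⟨u', v, by rw [← hcs.2], by simp [hq, ← hcs.1, List.append_assoc]⟩

theorem mem_ancestorsAlt (p q : String) :
    q ∈ ancestorsAlt p ↔ ∃ v, p.toList = q.toList ++ '/' :: v := by
  rw [ancestorsAlt_eq, mem_goS]
  constructor
  · rintro ⟨u, v, h, rfl⟩
    exact ⟨v, by simpa [String.toList_ofList] using h⟩
  · rintro ⟨v, h⟩
    refine ⟨q.toList, v, h, ?_⟩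
    apply String.toList_inj.mp
    simp

theorem startswith_anc (d q : String) :
    PySem.Str.startswith d (q ++ "/") = true ↔ q ∈ ancestorsAlt d := by
  rw [PySem.Str.startswith_eq, PySem.Chars.startswith_iff, mem_ancestorsAlt]
  have h1 : (q ++ "/").toList = q.toList ++ ['/'] := by
    rw [String.toList_append]
    norm_num [show ("/" : String).toList = ['/'] from by decide]
  rw [h1]
  constructor
  · rintro ⟨v, hv⟩
    exact ⟨v, by simp [← hv]⟩
  · rintro ⟨v, hv⟩
    exact ⟨v, by simp [hv]⟩

-- ---------- A-side: characterization of pathAncestors ----------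

def msplit : List Char → List (List Char)
  | [] => [[]]
  | c :: t =>
    if c = '/' then [] :: msplit t
    else
      match msplit t with
      | [] => [[c]]
      | h :: tt => (c :: h) :: tt

theorem msplit_ne_nil (cs : List Char) : msplit cs ≠ [] := by
  cases cs with
  | nil => simp [msplit]
  | cons c t =>
    rw [msplit]
    by_cases h : c = '/'
    · simp [h]
    · cases hm : msplit t <;> simp [h]

theorem go_nil (fuel : Nat) (cur : List Char) (acc : List (List Char)) :
    PySem.Chars.splitOn.go ['/'] (fuel+1) [] cur acc = (cur.reverse :: acc).reverse := by
  rw [PySem.Chars.splitOn.go]; simp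

theorem go_slash (fuel : Nat) (rest cur : List Char) (acc : List (List Char)) :
    PySem.Chars.splitOn.go ['/'] (fuel+1) ('/' :: rest) cur acc
      = PySem.Chars.splitOn.go ['/'] fuel rest [] (cur.reverse :: acc) := by
  rw [PySem.Chars.splitOn.go]
  simp [List.isPrefixOf]

theorem go_cons (fuel : Nat) (c : Char) (rest cur : List Char) (acc : List (List Char)) (h : c ≠ '/') :
    PySem.Chars.splitOn.go ['/'] (fuel+1) (c :: rest) cur acc
      = PySem.Chars.splitOn.go ['/'] fuel rest (c :: cur) acc := by
  rw [PySem.Chars.splitOn.go]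
  simp only [List.isPrefixOf]
  simp only [Bool.and_true, beq_iff_eq]
  rw [if_neg (by exact fun h' => absurd h'.symm h)]

theorem go_spec : ∀ (fuel : Nat) (l cur : List Char) (acc : List (List Char)), l.length < fuel →
    PySem.Chars.splitOn.go ['/'] fuel l cur acc
      = acc.reverse ++ (match msplit l with | [] => [] | h :: tt => (cur.reverse ++ h) :: tt) := by
  intro fuel
  induction fuel with
  | zero => intro l cur acc h; exact absurd h (by omega)
  | succ n ih =>
    intro l cur acc h
    cases l with
    | nil => rw [go_nil]; simp [msplit]
    | cons c t =>
      by_cases hc : c = '/'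
      · subst hc
        rw [go_slash, ih t [] _ (by simpa using h)]
        cases hm : msplit t with
        | nil => exact absurd hm (msplit_ne_nil t)
        | cons hh tt => simp [msplit, hm]
      · rw [go_cons _ _ _ _ _ hc, ih t (c :: cur) acc (by simpa using h)]
        cases hm : msplit t with
        | nil => exact absurd hm (msplit_ne_nil t)
        | cons hh tt => simp [msplit, hc, hm]

theorem splitOn_slash (cs : List Char) : PySem.Chars.splitOn cs ['/'] = msplit cs := by
  unfold PySem.Chars.splitOn
  rw [go_spec _ _ _ _ (by omega)]
  cases hm : msplit cs with
  | nil => exact absurd hm (msplit_ne_nil cs)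
  | cons h tt => simp

theorem join_cons' (c : Char) (h : List Char) (tt : List (List Char)) :
    PySem.Chars.join ['/'] ((c :: h) :: tt) = c :: PySem.Chars.join ['/'] (h :: tt) := by
  cases tt with
  | nil => rw [PySem.Chars.join_singleton, PySem.Chars.join_singleton]
  | cons b t => rw [PySem.Chars.join_cons_cons, PySem.Chars.join_cons_cons]; simp

theorem join_msplit (cs : List Char) : PySem.Chars.join ['/'] (msplit cs) = cs := by
  induction cs with
  | nil => simp [msplit, PySem.Chars.join_singleton]
  | cons c t ih =>
    by_cases hc : c = '/'
    · subst hc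
      rw [show msplit ('/' :: t) = [] :: msplit t from by simp [msplit]]
      cases hm : msplit t with
      | nil => exact absurd hm (msplit_ne_nil t)
      | cons h tt =>
        rw [hm] at ih
        rw [PySem.Chars.join_cons_cons]
        simp [ih]
    · cases hm : msplit t with
      | nil => exact absurd hm (msplit_ne_nil t)
      | cons h tt =>
        rw [show msplit (c :: t) = (c :: h) :: tt from by simp [msplit, hc, hm]]
        rw [join_cons', ← hm, ih]

theorem slash_not_mem_msplit (cs : List Char) : ∀ part ∈ msplit cs, '/' ∉ part := by
  induction cs with
  | nil => simp [msplit]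
  | cons c t ih =>
    by_cases hc : c = '/'
    · subst hc
      rw [show msplit ('/' :: t) = [] :: msplit t from by simp [msplit]]
      intro part hp
      rcases List.mem_cons.mp hp with rfl | hp
      · simp
      · exact ih part hp
    · cases hm : msplit t with
      | nil => exact absurd hm (msplit_ne_nil t)
      | cons h tt =>
        rw [show msplit (c :: t) = (c :: h) :: tt from by simp [msplit, hc, hm]]
        intro part hp
        rcases List.mem_cons.mp hp with rfl | hp
        · intro hmem
          rcases List.mem_cons.mp hmem with h1 | h1
          · exact hc h1.symm
          · exact ih h (hm ▸ List.mem_cons_self ..) h1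
        · exact ih part (hm ▸ List.mem_cons_of_mem _ hp)

theorem join_cons_ne_nil (a : List Char) (X : List (List Char)) (hX : X ≠ []) :
    PySem.Chars.join ['/'] (a :: X) = a ++ '/' :: PySem.Chars.join ['/'] X := by
  cases X with
  | nil => exact absurd rfl hX
  | cons b t => rw [PySem.Chars.join_cons_cons]; simp

theorem take_join_iff : ∀ (ps : List (List Char)), (∀ a ∈ ps, '/' ∉ a) → ∀ u : List Char,
    (∃ i : Nat, 1 ≤ i ∧ i < ps.length ∧ u = PySem.Chars.join ['/'] (ps.take i))
      ↔ ∃ v, PySem.Chars.join ['/'] ps = u ++ '/' :: v := by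
  intro ps
  induction ps with
  | nil =>
    intro _ u
    constructor
    · rintro ⟨i, h1, h2, -⟩; simp at h2
    · rintro ⟨v, h⟩
      rw [PySem.Chars.join_nil] at h
      exact absurd h.symm (by simp)
  | cons a ps ih =>
    intro hps u
    cases ps with
    | nil =>
      constructor
      · rintro ⟨i, h1, h2, -⟩; simp at h2; omega
      · rintro ⟨v, h⟩
        rw [PySem.Chars.join_singleton] at h
        exact absurd (h ▸ (by simp : '/' ∈ u ++ '/' :: v)) (hps a (by simp))
    | cons b t =>
      have hjoin : PySem.Chars.join ['/'] (a :: b :: t) = a ++ '/' :: PySem.Chars.join ['/'] (b :: t) :=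
        join_cons_ne_nil a (b :: t) (by simp)
      have ha : '/' ∉ a := hps a (by simp)
      have ih' := ih (fun x hx => hps x (List.mem_cons_of_mem _ hx))
      constructor
      · rintro ⟨i, h1, h2, rfl⟩
        cases i with
        | zero => omega
        | succ i0 =>
          cases i0 with
          | zero =>
            refine ⟨PySem.Chars.join ['/'] (b :: t), ?_⟩
            rw [hjoin]
            simp [PySem.Chars.join_singleton]
          | succ i1 =>
            have htake : (a :: b :: t).take (i1+2) = a :: (b :: t).take (i1+1) := rfl
            have hne : (b :: t).take (i1+1) ≠ [] := by simp
            rw [htake, join_cons_ne_nil _ _ hne]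
            obtain ⟨v, hv⟩ := (ih' (PySem.Chars.join ['/'] ((b :: t).take (i1+1)))).mp
              ⟨i1+1, by omega, by simp only [List.length_cons] at h2 ⊢; omega, rfl⟩
            refine ⟨v, ?_⟩
            rw [hjoin, hv]
            simp
      · rintro ⟨v, hv⟩
        rw [hjoin] at hv
        rcases List.append_eq_append_iff.mp hv with ⟨as, hu, has⟩ | ⟨bs, hab, hbs⟩
        · cases as with
          | nil =>
            refine ⟨1, le_refl 1, by simp, ?_⟩
            have h1 : (a :: b :: t).take 1 = [a] := rfl
            rw [h1, PySem.Chars.join_singleton]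
            simpa using hu
          | cons a' as' =>
            rw [List.cons_append] at has
            injection has with h1 h2
            obtain ⟨i', hi1, hi2, hu'⟩ := (ih' as').mpr ⟨v, h2⟩
            refine ⟨i' + 1, by omega, by simp only [List.length_cons] at hi2 ⊢; omega, ?_⟩
            have htake : (a :: b :: t).take (i' + 1) = a :: (b :: t).take i' := rfl
            have hne : (b :: t).take i' ≠ [] := by
              intro hnil
              have := congrArg List.length hnil
              simp at this
              omega
            rw [htake, join_cons_ne_nil _ _ hne, hu, ← h1, hu']
        · cases bs with
          | nil =>
            refine ⟨1, le_refl 1, by simp, ?_⟩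
            have h1 : (a :: b :: t).take 1 = [a] := rfl
            rw [h1, PySem.Chars.join_singleton]
            simpa using hab.symm
          | cons b' bs' =>
            rw [List.cons_append] at hbs
            injection hbs with h1 h2
            exact absurd (hab ▸ (by simp [← h1] : '/' ∈ u ++ b' :: bs')) ha

theorem parts_eq (p : String) :
    (PySem.Str.split? p "/").getD [] = (msplit p.toList).map String.ofList := by
  simp [PySem.Str.split?, PySem.Chars.split?,
    show ("/" : String).toList = ['/'] from by decide, splitOn_slash]

theorem pathAncestors_zeta (p : String) :
    pathAncestors p
      = (PySem.List.pyRange 1 ((((PySem.Str.split? p "/").getD []) : List String).length : Int) 1).foldl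
        (fun acc i =>
          if PySem.List.slice ((PySem.Str.split? p "/").getD []) none (some i) = [] then acc
          else acc ++ [PySem.Str.join "/" (PySem.List.slice ((PySem.Str.split? p "/").getD []) none (some i))])
        [] := rfl

theorem mem_pathAncestors (p q : String) :
    q ∈ pathAncestors p ↔ ∃ v, p.toList = q.toList ++ '/' :: v := by
  rw [pathAncestors_zeta, parts_eq]
  set parts := (msplit p.toList).map String.ofList with hparts
  have hlen : parts.length = (msplit p.toList).length := by simp [hparts]
  have hmapt : parts.map String.toList = msplit p.toList := by
    simp [hparts, List.map_map, Function.comp_def, String.toList_ofList]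
  have hfun : (fun (acc : List String) (i : Int) =>
      if PySem.List.slice parts none (some i) = [] then acc
      else acc ++ [PySem.Str.join "/" (PySem.List.slice parts none (some i))])
      = (fun (acc : List String) (i : Int) =>
          if (!decide (PySem.List.slice parts none (some i) = [])) = true
          then acc ++ [PySem.Str.join "/" (PySem.List.slice parts none (some i))] else acc) := by
    funext acc i
    by_cases h : PySem.List.slice parts none (some i) = [] <;> simp [h]
  rw [hfun, PySem.List.foldl_append_if]
  rw [List.nil_append, List.mem_map]
  have hjoin_toList : ∀ j : Nat, (PySem.Str.join "/" (parts.take j)).toList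
      = PySem.Chars.join ['/'] ((msplit p.toList).take j) := by
    intro j
    rw [PySem.Str.toList_join, show ("/" : String).toList = ['/'] from by decide,
      List.map_take, hmapt]
  constructor
  · rintro ⟨i, hi, rfl⟩
    rw [List.mem_filter] at hi
    obtain ⟨h1, h2⟩ := PySem.List.mem_pyRange_one.mp hi.1
    have h0 : (0:Int) ≤ i := by omega
    have hslice : PySem.List.slice parts none (some i) = parts.take i.toNat :=
      PySem.List.slice_to parts h0
    have hj1 : 1 ≤ i.toNat := by omega
    have hj2 : i.toNat < (msplit p.toList).length := by omega
    have := (take_join_iff (msplit p.toList) (slash_not_mem_msplit p.toList)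
      (PySem.Chars.join ['/'] ((msplit p.toList).take i.toNat))).mp ⟨i.toNat, hj1, hj2, rfl⟩
    obtain ⟨v, hv⟩ := this
    rw [join_msplit] at hv
    refine ⟨v, ?_⟩
    rw [hslice, hjoin_toList]
    exact hv
  · rintro ⟨v, hv⟩
    have hjms : PySem.Chars.join ['/'] (msplit p.toList) = q.toList ++ '/' :: v := by
      rw [join_msplit]; exact hv
    obtain ⟨j, hj1, hj2, hu⟩ := (take_join_iff (msplit p.toList)
      (slash_not_mem_msplit p.toList) q.toList).mpr ⟨v, hjms⟩
    refine ⟨(j : Int), ?_, ?_⟩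
    · rw [List.mem_filter]
      have hslice : PySem.List.slice parts none (some (j : Int)) = parts.take j := by
        rw [PySem.List.slice_to parts (by omega)]
        simp
      constructor
      · exact PySem.List.mem_pyRange_one.mpr ⟨by omega, by omega⟩
      · rw [hslice]
        have : (parts.take j).length = j := by
          rw [List.length_take]
          omega
        simp only [Bool.not_eq_true', decide_eq_false_iff_not]
        intro hnil
        rw [hnil] at this
        simp at this
        omega
    · have hslice : PySem.List.slice parts none (some (j : Int)) = parts.take j := by
        rw [PySem.List.slice_to parts (by omega)]
        simp
      rw [hslice]
      apply String.toList_inj.mp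
      rw [hjoin_toList j, ← hu]

theorem mem_anc_iff (p q : String) : q ∈ pathAncestors p ↔ q ∈ ancestorsAlt p := by
  rw [mem_pathAncestors, mem_ancestorsAlt]

-- ---------- boolean bridges ----------

theorem bool_eq {a b : Bool} (h : a = true ↔ b = true) : a = b := Bool.coe_iff_coe.mp h

theorem anyContains_eq (S : PySem.Set String) (x : String) :
    (pathAncestors x).any (fun a => S.contains a) = (ancestorsAlt x).any (fun a => S.contains a) := by
  apply bool_eq
  rw [List.any_eq_true, List.any_eq_true]
  constructor
  · rintro ⟨a, ha, hc⟩; exact ⟨a, (mem_anc_iff x a).mp ha, hc⟩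
  · rintro ⟨a, ha, hc⟩; exact ⟨a, (mem_anc_iff x a).mpr ha, hc⟩

theorem startswith_any (L M : List String) (h : ∀ a, a ∈ L ↔ a ∈ M) (x : String) :
    L.any (fun p => PySem.Str.startswith p (x ++ "/"))
      = (PySem.Set.ofList (M.flatMap ancestorsAlt)).contains x := by
  apply bool_eq
  rw [List.any_eq_true, PySem.Set.contains_iff, PySem.Set.mem_ofList, List.mem_flatMap]
  constructor
  · rintro ⟨d, hd, hs⟩; exact ⟨d, (h d).mp hd, (startswith_anc d x).mp hs⟩
  · rintro ⟨d, hd, hx⟩; exact ⟨d, (h d).mpr hd, (startswith_anc d x).mpr hx⟩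

-- ---------- the filter stage ----------

def filterB (raw_paths : List String) (previous_effective : Option (List String))
    (previous_raw : Option (List String)) : List String :=
  let prev_paths := previous_effective.getD []
  let prev_selected : PySem.Set String :=
    PySem.Set.union (PySem.Set.ofList (previous_raw.getD [])) (PySem.Set.ofList prev_paths)
  let unique := PySem.List.dedup raw_paths
  let raw_set : PySem.Set String := PySem.Set.ofList unique
  let anc_of_raw : PySem.Set String := PySem.Set.ofList (unique.flatMap ancestorsAlt)
  let anc_of_prev : PySem.Set String := PySem.Set.ofList (prev_selected.flatMap ancestorsAlt)
  unique.foldl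
    (fun filtered p =>
      if !(prev_selected.contains p) then
        if (ancestorsAlt p).any (fun a => raw_set.contains a) then filtered
        else if anc_of_raw.contains p && anc_of_prev.contains p then filtered
        else filtered ++ [p]
      else filtered ++ [p]) []

theorem filterA_zeta (raw_paths : List String) (previous_raw previous_effective : Option (List String)) :
    filter_raw_paths raw_paths previous_raw previous_effective
      = (PySem.List.dedup raw_paths).foldl
        (fun filtered path =>
          if ((pathAncestors path).any (fun parent => (PySem.Set.ofList (PySem.List.dedup raw_paths)).contains parent)) && !((PySem.Set.union (PySem.Set.ofList (previous_raw.getD [])) (PySem.Set.ofList (previous_effective.getD []))).contains path) then filtered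
          else if !((PySem.Set.union (PySem.Set.ofList (previous_raw.getD [])) (PySem.Set.ofList (previous_effective.getD []))).contains path)
              && (PySem.Set.ofList (PySem.List.dedup raw_paths)).any (fun p => PySem.Str.startswith p (path ++ "/"))
              && (PySem.Set.union (PySem.Set.ofList (previous_raw.getD [])) (PySem.Set.ofList (previous_effective.getD []))).any (fun p => PySem.Str.startswith p (path ++ "/")) then filtered
          else filtered ++ [path]) [] := rfl

theorem filterB_zeta (raw_paths : List String) (previous_effective previous_raw : Option (List String)) :
    filterB raw_paths previous_effective previous_raw
      = (PySem.List.dedup raw_paths).foldl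
        (fun filtered p =>
          if !((PySem.Set.union (PySem.Set.ofList (previous_raw.getD [])) (PySem.Set.ofList (previous_effective.getD []))).contains p) then
            if (ancestorsAlt p).any (fun a => (PySem.Set.ofList (PySem.List.dedup raw_paths)).contains a) then filtered
            else if (PySem.Set.ofList ((PySem.List.dedup raw_paths).flatMap ancestorsAlt)).contains p
                && (PySem.Set.ofList (((PySem.Set.union (PySem.Set.ofList (previous_raw.getD [])) (PySem.Set.ofList (previous_effective.getD []))) : List String).flatMap ancestorsAlt)).contains p then filtered
            else filtered ++ [p]
          else filtered ++ [p]) [] := rfl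

theorem filter_eq (raw_paths : List String) (previous_effective previous_raw : Option (List String)) :
    filter_raw_paths raw_paths previous_raw previous_effective
      = filterB raw_paths previous_effective previous_raw := by
  rw [filterA_zeta, filterB_zeta]
  have hstep :
      (fun (filtered : List String) (path : String) =>
          if ((pathAncestors path).any (fun parent => (PySem.Set.ofList (PySem.List.dedup raw_paths)).contains parent)) && !((PySem.Set.union (PySem.Set.ofList (previous_raw.getD [])) (PySem.Set.ofList (previous_effective.getD []))).contains path) then filtered
          else if !((PySem.Set.union (PySem.Set.ofList (previous_raw.getD [])) (PySem.Set.ofList (previous_effective.getD []))).contains path)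
              && (PySem.Set.ofList (PySem.List.dedup raw_paths)).any (fun p => PySem.Str.startswith p (path ++ "/"))
              && (PySem.Set.union (PySem.Set.ofList (previous_raw.getD [])) (PySem.Set.ofList (previous_effective.getD []))).any (fun p => PySem.Str.startswith p (path ++ "/")) then filtered
          else filtered ++ [path])
      = (fun (filtered : List String) (p : String) =>
          if !((PySem.Set.union (PySem.Set.ofList (previous_raw.getD [])) (PySem.Set.ofList (previous_effective.getD []))).contains p) then
            if (ancestorsAlt p).any (fun a => (PySem.Set.ofList (PySem.List.dedup raw_paths)).contains a) then filtered
            else if (PySem.Set.ofList ((PySem.List.dedup raw_paths).flatMap ancestorsAlt)).contains p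
                && (PySem.Set.ofList (((PySem.Set.union (PySem.Set.ofList (previous_raw.getD [])) (PySem.Set.ofList (previous_effective.getD []))) : List String).flatMap ancestorsAlt)).contains p then filtered
            else filtered ++ [p]
          else filtered ++ [p]) := by
    funext filtered path
    rw [anyContains_eq (PySem.Set.ofList (PySem.List.dedup raw_paths)) path]
    rw [startswith_any (PySem.Set.ofList (PySem.List.dedup raw_paths)) (PySem.List.dedup raw_paths) (fun a => PySem.Set.mem_ofList _ a) path]
    rw [startswith_any (PySem.Set.union (PySem.Set.ofList (previous_raw.getD [])) (PySem.Set.ofList (previous_effective.getD []))) (PySem.Set.union (PySem.Set.ofList (previous_raw.getD [])) (PySem.Set.ofList (previous_effective.getD []))) (fun _ => Iff.rfl) path]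
    generalize ((ancestorsAlt path).any fun a => (PySem.Set.ofList (PySem.List.dedup raw_paths)).contains a) = a
    generalize (PySem.Set.ofList ((PySem.List.dedup raw_paths).flatMap ancestorsAlt)).contains path = ch
    generalize (PySem.Set.ofList (((PySem.Set.union (PySem.Set.ofList (previous_raw.getD [])) (PySem.Set.ofList (previous_effective.getD []))) : List String).flatMap ancestorsAlt)).contains path = cp
    generalize (PySem.Set.union (PySem.Set.ofList (previous_raw.getD [])) (PySem.Set.ofList (previous_effective.getD []))).contains path = u
    cases u <;> cases a <;> cases ch <;> cases cp <;> simp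
  rw [hstep]

-- ---------- the main stage, A side re-stated through named helpers ----------

def hasDesc (F : List String) (x : String) : Bool :=
  (PySem.Set.ofList F).any (fun desc => desc == x || PySem.Str.startswith desc (x ++ "/"))

def final1 (F P : List String) : PySem.Set String :=
  ((PySem.Set.ofList P).diff (PySem.Set.ofList F)).foldl
    (fun fs path => if !(hasDesc F path) then fs.discard path else fs) (PySem.Set.ofList P)

def final2 (F P : List String) : PySem.Set String :=
  (final1 F P).update (PySem.Set.ofList F)

def final3 (F P : List String) : PySem.Set String :=
  (final2 F P).foldl
    (fun fs path =>
      (pathAncestors path).foldl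
        (fun fs parent =>
          if fs.contains parent && !((PySem.Set.ofList P).contains parent)
              && !((PySem.Set.ofList F).contains parent)
          then fs.discard parent else fs) fs) (final2 F P)

def emitA (c : String → Bool) (l : List String) (ordered : List String) : List String :=
  l.foldl (fun ordered path => if c path && !(ordered.contains path) then ordered ++ [path] else ordered)
    ordered

def mainA (F P : List String) : List String :=
  (PySem.List.sorted2 (final3 F P) (fun p => PySem.Str.count p "/") (fun p => p) false).foldl
    (fun ordered path => if !(ordered.contains path) then ordered ++ [path] else ordered)
    (emitA (fun path => (final3 F P).contains path) F
      (emitA (fun path => (final3 F P).contains path) P []))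

theorem portA_eq (raw_paths : List String) (previous_effective previous_raw : Option (List String)) :
    compute_effective_paths raw_paths previous_effective previous_raw
      = mainA (filter_raw_paths raw_paths previous_raw previous_effective)
          (previous_effective.getD []) := rfl

-- ---------- the main stage, B side re-stated through named helpers ----------

def ancSet (L : List String) : PySem.Set String := PySem.Set.ofList (L.flatMap ancestorsAlt)

def condB (F : List String) (p : String) : Bool :=
  (PySem.Set.ofList F).contains p || (ancSet F).contains p

def emitB (c : String → Bool) (l : List String) (st : List String × PySem.Set String) :
    List String × PySem.Set String :=
  l.foldl (fun (st : List String × PySem.Set String) p =>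
    if !(st.2.contains p) && c p then (st.1 ++ [p], st.2.add p) else st) st

def emitB2 (l : List String) (st : List String × PySem.Set String) :
    List String × PySem.Set String :=
  l.foldl (fun (st : List String × PySem.Set String) p =>
    if !(st.2.contains p) then (st.1 ++ [p], st.2.add p) else st) st

def mainB (F P : List String) : List String :=
  (emitB2 F (emitB (condB F) P ([], PySem.Set.empty))).1

theorem portB_eq (raw_paths : List String) (previous_effective previous_raw : Option (List String)) :
    compute_effective_paths_alt raw_paths previous_effective previous_raw
      = mainB (filterB raw_paths previous_effective previous_raw) (previous_effective.getD []) := rfl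

-- ---------- membership in final2, and the dead third loop ----------

theorem hasDesc_iff (F : List String) (x : String) :
    hasDesc F x = true ↔ x ∈ F ∨ ∃ d ∈ F, x ∈ ancestorsAlt d := by
  unfold hasDesc
  rw [List.any_eq_true]
  constructor
  · rintro ⟨d, hd, hb⟩
    rw [PySem.Set.mem_ofList] at hd
    rcases Bool.or_eq_true _ _ |>.mp hb with h | h
    · left; rwa [← beq_iff_eq.mp h]
    · right; exact ⟨d, hd, (startswith_anc d x).mp h⟩
  · rintro (hx | ⟨d, hd, hx⟩)
    · exact ⟨x, (PySem.Set.mem_ofList F x).mpr hx, by simp⟩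
    · exact ⟨d, (PySem.Set.mem_ofList F d).mpr hd,
        by rw [Bool.or_eq_true]; right; exact (startswith_anc d x).mpr hx⟩

theorem mem_foldl_discard (c : String → Bool) (l : List String) :
    ∀ (fs : PySem.Set String) (x : String),
      x ∈ l.foldl (fun fs p => if c p then fs.discard p else fs) fs
        ↔ x ∈ fs ∧ ¬(x ∈ l ∧ c x = true) := by
  induction l with
  | nil => intro fs x; simp
  | cons p t ih =>
    intro fs x
    simp only [List.foldl_cons]
    rw [ih]
    by_cases hc : c p = true
    · rw [if_pos hc]
      rw [PySem.Set.mem_discard]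
      by_cases hx : x = p
      · subst hx; simp [hc]
      · simp [hx, List.mem_cons]
    · rw [if_neg hc]
      by_cases hx : x = p
      · subst hx; simp [List.mem_cons, hc]
      · simp [hx, List.mem_cons]

theorem mem_final2 (F P : List String) (x : String) :
    x ∈ final2 F P ↔ x ∈ F ∨ (x ∈ P ∧ (x ∈ F ∨ ∃ d ∈ F, x ∈ ancestorsAlt d)) := by
  unfold final2 final1
  rw [PySem.Set.mem_update, mem_foldl_discard]
  rw [PySem.Set.mem_ofList, PySem.Set.mem_diff, PySem.Set.mem_ofList, PySem.Set.mem_ofList]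
  have hdes : (!(hasDesc F x)) = true ↔ ¬(x ∈ F ∨ ∃ d ∈ F, x ∈ ancestorsAlt d) := by
    rw [Bool.not_eq_true', ← hasDesc_iff]
    simp
  constructor
  · rintro (⟨hP, hn⟩ | hF)
    · by_cases hF : x ∈ F
      · exact Or.inl hF
      · refine Or.inr ⟨hP, ?_⟩
        by_cases hd : x ∈ F ∨ ∃ d ∈ F, x ∈ ancestorsAlt d
        · exact hd
        · exact absurd ⟨⟨hP, hF⟩, hdes.mpr hd⟩ hn
    · exact Or.inl hF
  · rintro (hF | ⟨hP, hd⟩)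
    · exact Or.inr hF
    · rcases hd with hF | hanc
      · exact Or.inr hF
      · refine Or.inl ⟨hP, ?_⟩
        rintro ⟨⟨-, -⟩, hdd⟩
        exact (hdes.mp hdd) (Or.inr hanc)

theorem inner_noop (prevS rawS : PySem.Set String) (anc : List String) :
    ∀ (fs : PySem.Set String),
      (∀ x ∈ fs, prevS.contains x = true ∨ rawS.contains x = true) →
      anc.foldl (fun fs parent =>
        if fs.contains parent && !(prevS.contains parent) && !(rawS.contains parent)
        then fs.discard parent else fs) fs = fs := by
  induction anc with
  | nil => intro fs _; rfl
  | cons p t ih =>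
    intro fs h
    simp only [List.foldl_cons]
    have hcond : ¬((fs.contains p && !(prevS.contains p) && !(rawS.contains p)) = true) := by
      intro hct
      rcases (Bool.and_eq_true _ _).mp hct with ⟨h12, h3⟩
      rcases (Bool.and_eq_true _ _).mp h12 with ⟨h1, h2⟩
      rcases h p ((PySem.Set.contains_iff fs p).mp h1) with hh | hh
      · rw [hh] at h2; simp at h2
      · rw [hh] at h3; simp at h3
    rw [if_neg hcond]
    exact ih fs h

theorem outer_noop (prevS rawS : PySem.Set String) (S : List String) :
    ∀ (fs : PySem.Set String),
      (∀ x ∈ fs, prevS.contains x = true ∨ rawS.contains x = true) →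
      S.foldl (fun fs path =>
        (pathAncestors path).foldl (fun fs parent =>
          if fs.contains parent && !(prevS.contains parent) && !(rawS.contains parent)
          then fs.discard parent else fs) fs) fs = fs := by
  induction S with
  | nil => intro fs _; rfl
  | cons p t ih =>
    intro fs h
    simp only [List.foldl_cons]
    rw [inner_noop prevS rawS (pathAncestors p) fs h]
    exact ih fs h

theorem final3_eq (F P : List String) : final3 F P = final2 F P := by
  unfold final3
  apply outer_noop
  intro x hx
  rcases (mem_final2 F P x).mp hx with h | ⟨hp, -⟩
  · right; exact (PySem.Set.contains_iff _ _).mpr ((PySem.Set.mem_ofList _ _).mpr h)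
  · left; exact (PySem.Set.contains_iff _ _).mpr ((PySem.Set.mem_ofList _ _).mpr hp)

-- ---------- the ordered emission ----------

theorem mem_emitA (c : String → Bool) (l : List String) :
    ∀ (ordered : List String) (x : String),
      (x ∈ ordered ∨ (x ∈ l ∧ c x = true)) → x ∈ emitA c l ordered := by
  unfold emitA
  induction l with
  | nil =>
    intro o x h
    rcases h with h | ⟨h, -⟩
    · exact h
    · simp at h
  | cons p t ih =>
    intro o x h
    simp only [List.foldl_cons]
    have hmono : ∀ y ∈ o, y ∈ (if c p && !(o.contains p) then o ++ [p] else o) := by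
      intro y hy
      split <;> simp [hy]
    rcases h with h | ⟨hl, hcx⟩
    · exact ih _ x (Or.inl (hmono x h))
    · rcases List.mem_cons.mp hl with rfl | ht
      · apply ih _ x
        left
        by_cases hc2 : o.contains x = true
        · exact hmono x (List.contains_iff_mem.mp hc2)
        · simp only [Bool.not_eq_true] at hc2
          rw [hcx, hc2]
          simp
      · exact ih _ x (Or.inr ⟨ht, hcx⟩)

theorem append_new_noop (l : List String) :
    ∀ (ordered : List String), (∀ x ∈ l, ordered.contains x = true) →
      l.foldl (fun o p => if !(o.contains p) then o ++ [p] else o) ordered = ordered := by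
  induction l with
  | nil => intro o _; rfl
  | cons p t ih =>
    intro o h
    simp only [List.foldl_cons]
    rw [h p (by simp)]
    simp only [Bool.not_true, Bool.false_eq_true, if_false]
    exact ih o (fun x hx => h x (List.mem_cons_of_mem _ hx))

theorem emit_pair (cA cB : String → Bool) (l : List String) :
    ∀ (ordered : List String) (seen : PySem.Set String),
      (∀ x, seen.contains x = ordered.contains x) → (∀ p ∈ l, cB p = cA p) →
      (emitB cB l (ordered, seen)).1 = emitA cA l ordered
        ∧ ∀ x, (emitB cB l (ordered, seen)).2.contains x = (emitA cA l ordered).contains x := by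
  induction l with
  | nil => intro o s hinv _; exact ⟨rfl, hinv⟩
  | cons p t ih =>
    intro o s hinv hc
    have hcp : cB p = cA p := hc p (by simp)
    have hsc : s.contains p = o.contains p := hinv p
    unfold emitB emitA
    simp only [List.foldl_cons]
    by_cases hb : (cA p && !(o.contains p)) = true
    · have hb' : (!(s.contains p) && cB p) = true := by
        rw [hcp, hsc, Bool.and_comm]; exact hb
      rw [if_pos hb', if_pos hb]
      refine ih (o ++ [p]) (s.add p) ?_ (fun q hq => hc q (List.mem_cons_of_mem _ hq))
      intro x
      apply bool_eq
      rw [PySem.Set.contains_iff, PySem.Set.mem_add, List.contains_iff_mem, List.mem_append,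
        List.mem_singleton]
      have hx : x ∈ s ↔ x ∈ o := by
        rw [← PySem.Set.contains_iff, hinv x, List.contains_iff_mem]
      rw [hx]
    · have hb' : ¬((!(s.contains p) && cB p) = true) := by
        rw [hcp, hsc, Bool.and_comm]; exact hb
      rw [if_neg hb', if_neg hb]
      exact ih o s hinv (fun q hq => hc q (List.mem_cons_of_mem _ hq))

theorem emit_pair2 (cA : String → Bool) (l : List String) :
    ∀ (ordered : List String) (seen : PySem.Set String),
      (∀ x, seen.contains x = ordered.contains x) → (∀ p ∈ l, cA p = true) →
      (emitB2 l (ordered, seen)).1 = emitA cA l ordered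
        ∧ ∀ x, (emitB2 l (ordered, seen)).2.contains x = (emitA cA l ordered).contains x := by
  induction l with
  | nil => intro o s hinv _; exact ⟨rfl, hinv⟩
  | cons p t ih =>
    intro o s hinv hcA
    have hsc : s.contains p = o.contains p := hinv p
    unfold emitB2 emitA
    simp only [List.foldl_cons]
    by_cases hb : (o.contains p) = true
    · have h1 : ¬((!(s.contains p)) = true) := by rw [hsc, hb]; simp
      have h2 : ¬((cA p && !(o.contains p)) = true) := by rw [hb]; simp
      rw [if_neg h1, if_neg h2]
      exact ih o s hinv (fun q hq => hcA q (List.mem_cons_of_mem _ hq))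
    · have hbf : o.contains p = false := by simpa using hb
      have h1 : (!(s.contains p)) = true := by rw [hsc, hbf]; simp
      have h2 : (cA p && !(o.contains p)) = true := by rw [hcA p (by simp), hbf]; simp
      rw [if_pos h1, if_pos h2]
      refine ih (o ++ [p]) (s.add p) ?_ (fun q hq => hcA q (List.mem_cons_of_mem _ hq))
      intro x
      apply bool_eq
      rw [PySem.Set.contains_iff, PySem.Set.mem_add, List.contains_iff_mem, List.mem_append,
        List.mem_singleton]
      have hx : x ∈ s ↔ x ∈ o := by
        rw [← PySem.Set.contains_iff, hinv x, List.contains_iff_mem]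
      rw [hx]

theorem main_eq (F P : List String) : mainA F P = mainB F P := by
  have hcB : ∀ p : String, condB F p = true ↔ (p ∈ F ∨ ∃ d ∈ F, p ∈ ancestorsAlt d) := by
    intro p
    unfold condB ancSet
    rw [Bool.or_eq_true, PySem.Set.contains_iff, PySem.Set.contains_iff,
      PySem.Set.mem_ofList, PySem.Set.mem_ofList, List.mem_flatMap]
  have hc : ∀ p ∈ P, condB F p = (final3 F P).contains p := by
    intro p hp
    rw [final3_eq]
    apply bool_eq
    rw [hcB p, PySem.Set.contains_iff, mem_final2]
    constructor
    · rintro (h | h)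
      · exact Or.inl h
      · exact Or.inr ⟨hp, Or.inr h⟩
    · rintro (h | ⟨-, h⟩)
      · exact Or.inl h
      · rcases h with h | h
        · exact Or.inl h
        · exact Or.inr h
  have hinv0 : ∀ x : String,
      (PySem.Set.empty : PySem.Set String).contains x = ([] : List String).contains x :=
    fun _ => rfl
  obtain ⟨h1, hinv1⟩ := emit_pair (fun path => (final3 F P).contains path) (condB F) P []
    PySem.Set.empty hinv0 hc
  have hcF : ∀ p ∈ F, (fun path => (final3 F P).contains path) p = true := by
    intro p hp
    rw [final3_eq]
    exact (PySem.Set.contains_iff _ _).mpr ((mem_final2 F P p).mpr (Or.inl hp))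
  obtain ⟨h2, -⟩ := emit_pair2 (fun path => (final3 F P).contains path) F
    (emitB (condB F) P ([], PySem.Set.empty)).1 (emitB (condB F) P ([], PySem.Set.empty)).2
    (fun x => by rw [hinv1 x, h1]) hcF
  have h2' : (emitB2 F (emitB (condB F) P ([], PySem.Set.empty))).1
      = emitA (fun path => (final3 F P).contains path) F
          ((emitB (condB F) P ([], PySem.Set.empty)).1) := by
    simpa only [Prod.mk.eta] using h2
  unfold mainA mainB
  rw [h2', h1]
  apply append_new_noop
  intro x hx
  have hxf : x ∈ final2 F P := by
    have hperm := PySem.List.sorted2_perm (final3 F P) (fun p => PySem.Str.count p "/")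
      (fun p => p) false
    have := hperm.mem_iff.mp hx
    rwa [final3_eq] at this
  apply List.contains_iff_mem.mpr
  rcases (mem_final2 F P x).mp hxf with h | ⟨hp, -⟩
  · exact mem_emitA _ F _ x (Or.inr ⟨h, hcF x h⟩)
  · have hx1 : x ∈ emitA (fun path => (final3 F P).contains path) P [] :=
      mem_emitA _ P [] x (Or.inr ⟨hp, by
        rw [final3_eq]
        exact (PySem.Set.contains_iff _ _).mpr hxf⟩)
    exact mem_emitA _ F _ x (Or.inl hx1)

theorem equiv_main : ∀ (raw_paths : List String) (previous_effective : Option (List String)) (previous_raw : Option (List String)),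
    compute_effective_paths raw_paths previous_effective previous_raw
      = compute_effective_paths_alt raw_paths previous_effective previous_raw := by
  intro raw pe pr
  rw [portA_eq, portB_eq, filter_eq, main_eq]

-- ===== VERDICT (by name: the statement is the Claim_ definition above) =====
theorem compute_effective_paths_spec : Claim_equal_compute_effective_paths := by
  intro raw_paths pe pr _
  unfold Spec_compute_effective_paths
  exact equiv_main raw_paths pe pr
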